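-- pv_equiv track=rewrite | github.com/mordekasiser/wechat-chatlog-studio | src/chatlog_studio/core.py | resolve_account_username
-- ===== SOURCE A (Python) =====
-- def resolve_account_username(
--     account_dir_name: str,
--     sender_name_map: dict[int, str],
--     contact_username: str,
-- ) -> str:
--     usernames = set(sender_name_map.values())
--     if account_dir_name in usernames:
--         return account_dir_name
--
--     candidates = sorted(
--         (
--             user_name
--             for user_name in usernames
--             if user_name != contact_username and account_dir_name.startswith(f"{user_name}_")
--         ),
--         key=len,
--         reverse=True,
--     )
--     if candidates:
--         return candidates[0]
--
--     base_name, separator, _ = account_dir_name.rpartition("_")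
--     if separator and base_name:
--         return base_name
--     return account_dir_name
-- ===== SOURCE B (Python) =====
-- def resolve_account_username(
--     account_dir_name: str,
--     sender_name_map: dict[int, str],
--     contact_username: str,
-- ) -> str:
--     # Single linear pass: return on exact match, else keep the longest prefix
--     # candidate (the max-length candidate is unique, since equal-length prefixes
--     # of the same string coincide).
--     best = None
--     for user_name in sender_name_map.values():
--         if user_name == account_dir_name:
--             return account_dir_name
--         if (
--             user_name != contact_username
--             and account_dir_name.startswith(user_name + "_")
--             and (best is None or len(user_name) > len(best))
--         ):
--             best = user_name
--     if best is not None: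
--         return best
--     i = account_dir_name.rfind("_")
--     if i > 0:
--         return account_dir_name[:i]
--     return account_dir_name
-- ===== Notes on version B (the rewrite author's own statement) =====
-- stated objective: simpler
-- what changed: Replaced set-build + filter + sort-by-length-descending + take-first with a single linear scan over the values that returns on an exact match and otherwise keeps the longest prefix candidate (updating only on strictly greater length; the max-length candidate is unique), with the rpartition fallback expressed via rfind.
import Mathlib
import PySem

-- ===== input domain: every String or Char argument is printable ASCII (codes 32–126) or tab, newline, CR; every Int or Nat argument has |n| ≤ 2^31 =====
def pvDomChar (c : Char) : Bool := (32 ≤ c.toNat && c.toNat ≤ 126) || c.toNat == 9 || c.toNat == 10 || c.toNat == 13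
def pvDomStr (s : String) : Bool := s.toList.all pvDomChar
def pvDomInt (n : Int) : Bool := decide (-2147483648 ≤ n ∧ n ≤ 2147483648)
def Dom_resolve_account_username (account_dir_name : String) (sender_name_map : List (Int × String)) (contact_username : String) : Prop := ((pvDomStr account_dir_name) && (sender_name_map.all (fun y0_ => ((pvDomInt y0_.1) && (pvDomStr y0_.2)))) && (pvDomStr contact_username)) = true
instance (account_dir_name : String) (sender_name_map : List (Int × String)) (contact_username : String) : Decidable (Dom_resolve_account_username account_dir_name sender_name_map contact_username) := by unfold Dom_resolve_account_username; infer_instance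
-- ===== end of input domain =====

-- B replaces the build-filter-sort-take-first pipeline by one linear scan that keeps the
-- longest matching candidate (the max-length candidate is unique); objective: a simpler single pass.

-- ===== PORT A =====
def resolve_account_username (account_dir_name : String) (sender_name_map : List (Int × String)) (contact_username : String) : String :=
  let usernames := PySem.Set.ofList (PySem.Dict.values (PySem.Dict.ofList sender_name_map))
  if PySem.Set.contains usernames account_dir_name then account_dir_name
  else
    let candidates := PySem.List.sorted
      (usernames.filter (fun user_name =>
        user_name != contact_username &&
        PySem.Chars.startswith account_dir_name.toList (user_name.toList ++ ['_'])))
      (fun u => PySem.Str.len u) true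
    match candidates with
    | c :: _ => c
    | [] =>
      -- rpartition("_") ported by hand via the last index of '_' (exact for a 1-char separator)
      let i := PySem.Chars.rfind account_dir_name.toList ['_']
      let base_name := if 0 ≤ i then PySem.Str.slice account_dir_name none (some i) else ""
      let separator := if 0 ≤ i then "_" else ""
      if separator ≠ "" ∧ base_name ≠ "" then base_name else account_dir_name

-- ===== PORT B =====
def pvAltFallback (account_dir_name : String) : String :=
  let i := PySem.Chars.rfind account_dir_name.toList ['_']
  if 0 < i then PySem.Str.slice account_dir_name none (some i) else account_dir_name

def pvAltLoop (account_dir_name contact_username : String) : List String → Option String → String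
  | [], best =>
    match best with
    | some b => b
    | none => pvAltFallback account_dir_name
  | user_name :: rest, best =>
    if user_name = account_dir_name then account_dir_name
    else if (user_name != contact_username
          && PySem.Chars.startswith account_dir_name.toList (user_name.toList ++ ['_'])
          && (match best with
              | none => true
              | some b => decide (PySem.Str.len b < PySem.Str.len user_name)))
    then pvAltLoop account_dir_name contact_username rest (some user_name)
    else pvAltLoop account_dir_name contact_username rest best

def resolve_account_username_alt (account_dir_name : String) (sender_name_map : List (Int × String)) (contact_username : String) : String :=
  pvAltLoop account_dir_name contact_username
    (PySem.Dict.values (PySem.Dict.ofList sender_name_map)) none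

-- ===== PRECONDITION & SPEC =====
def Spec_resolve_account_username (account_dir_name : String) (sender_name_map : List (Int × String)) (contact_username : String) (out : String) : Prop := out = resolve_account_username_alt account_dir_name sender_name_map contact_username
instance (account_dir_name : String) (sender_name_map : List (Int × String)) (contact_username : String) (out : String) : Decidable (Spec_resolve_account_username account_dir_name sender_name_map contact_username out) := by unfold Spec_resolve_account_username; infer_instance

-- ===== CLAIM (what is proved, stated in full; the proofs are below) =====
def Claim_equal_resolve_account_username : Prop := ∀ (account_dir_name : String) (sender_name_map : List (Int × String)) (contact_username : String), Dom_resolve_account_username account_dir_name sender_name_map contact_username → Spec_resolve_account_username account_dir_name sender_name_map contact_username (resolve_account_username account_dir_name sender_name_map contact_username)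

-- ===== LEMMAS AND PROOFS =====

-- the filter/update condition of both programs, minus B's best-length check
def pvCand (account_dir_name contact_username user_name : String) : Bool :=
  user_name != contact_username &&
  PySem.Chars.startswith account_dir_name.toList (user_name.toList ++ ['_'])

-- B's accumulator step
def pvStep (account_dir_name contact_username : String) (best : Option String) (user_name : String) : Option String :=
  if (pvCand account_dir_name contact_username user_name
      && (match best with
          | none => true
          | some b => decide (PySem.Str.len b < PySem.Str.len user_name)))
  then some user_name else best

-- equal-length prefix candidates of the same string coincide
lemma pv_uniq {adn u v : String}
    (hu : (u.toList ++ ['_']) <+: adn.toList)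
    (hv : (v.toList ++ ['_']) <+: adn.toList)
    (hl : PySem.Str.len u = PySem.Str.len v) : u = v := by
  have hl' : u.toList.length = v.toList.length := by
    simp only [PySem.Str.len] at hl; exact_mod_cast hl
  have h1 : (u.toList ++ ['_']).length = (v.toList ++ ['_']).length := by simp [hl']
  have h2 : (u.toList ++ ['_']) = (v.toList ++ ['_']) :=
    List.IsPrefix.eq_of_length (List.prefix_of_prefix_length_le hu hv (le_of_eq h1)) h1
  exact String.toList_inj.mp (List.append_cancel_right h2)

lemma pvAltLoop_mem {adn cu : String} {l : List String} (h : adn ∈ l) (b : Option String) :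
    pvAltLoop adn cu l b = adn := by
  induction l generalizing b with
  | nil => cases h
  | cons x rest ih =>
    by_cases hx : x = adn
    · simp [pvAltLoop, hx]
    · have hmem : adn ∈ rest := by
        rcases List.mem_cons.mp h with h' | h'
        · exact absurd h'.symm hx
        · exact h'
      cases b <;>
        · simp only [pvAltLoop, if_neg hx]
          split <;> exact ih hmem _

lemma pvAltLoop_eq_foldl {adn cu : String} {l : List String} (h : ∀ u ∈ l, u ≠ adn)
    (b : Option String) :
    pvAltLoop adn cu l b =
      (match l.foldl (pvStep adn cu) b with
       | some m => m
       | none => pvAltFallback adn) := by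
  induction l generalizing b with
  | nil => rfl
  | cons x rest ih =>
    have hx : x ≠ adn := h x (List.mem_cons_self)
    have hrest : ∀ u ∈ rest, u ≠ adn := fun u hu => h u (List.mem_cons_of_mem _ hu)
    cases b <;>
      · simp only [pvAltLoop, if_neg hx, List.foldl_cons, pvStep, pvCand]
        split <;> exact ih hrest _

lemma pvFold_spec (adn cu : String) (l : List String) : ∀ b : Option String,
    (l.foldl (pvStep adn cu) b = b ∧
      ∀ u ∈ l, pvCand adn cu u = true → ∃ bv, b = some bv ∧ PySem.Str.len u ≤ PySem.Str.len bv)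
    ∨ (∃ m, l.foldl (pvStep adn cu) b = some m ∧ pvCand adn cu m = true ∧ m ∈ l ∧
        (∀ u ∈ l, pvCand adn cu u = true → PySem.Str.len u ≤ PySem.Str.len m) ∧
        (∀ bv, b = some bv → PySem.Str.len bv ≤ PySem.Str.len m)) := by
  induction l with
  | nil => intro b; left; exact ⟨rfl, by simp⟩
  | cons x rest ih =>
    intro b
    simp only [List.foldl_cons]
    by_cases hc : (pvCand adn cu x
        && (match b with
            | none => true
            | some bb => decide (PySem.Str.len bb < PySem.Str.len x))) = true
    · rw [Bool.and_eq_true] at hc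
      obtain ⟨hcx, hbx⟩ := hc
      have hstep : pvStep adn cu b x = some x := by
        unfold pvStep; rw [if_pos (by rw [Bool.and_eq_true]; exact ⟨hcx, hbx⟩)]
      rw [hstep]
      have hble : ∀ bv, b = some bv → PySem.Str.len bv ≤ PySem.Str.len x := by
        intro bv hbv; subst hbv; simp only [decide_eq_true_eq] at hbx; exact le_of_lt hbx
      rcases ih (some x) with ⟨hfix, hall⟩ | ⟨m, hm, hcm, hmem, hall, hbv⟩
      · right
        refine ⟨x, hfix, hcx, List.mem_cons_self, ?_, hble⟩
        intro u hu hcu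
        rcases List.mem_cons.mp hu with h | h
        · subst h; exact le_refl _
        · rcases hall u h hcu with ⟨bv, hbv, hle⟩
          cases hbv; exact hle
      · right
        refine ⟨m, hm, hcm, List.mem_cons_of_mem _ hmem, ?_, ?_⟩
        · intro u hu hcu
          rcases List.mem_cons.mp hu with h | h
          · rw [h]; exact hbv x rfl
          · exact hall u h hcu
        · intro bv hb; exact le_trans (hble bv hb) (hbv x rfl)
    · have hstep : pvStep adn cu b x = b := by unfold pvStep; rw [if_neg hc]
      rw [hstep]
      have hxb : pvCand adn cu x = true → ∃ bv, b = some bv ∧ PySem.Str.len x ≤ PySem.Str.len bv := by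
        intro hcx
        cases b with
        | none => simp [hcx] at hc
        | some bb =>
          refine ⟨bb, rfl, ?_⟩
          simp only [hcx, Bool.true_and, decide_eq_true_eq] at hc
          omega
      rcases ih b with ⟨hfix, hall⟩ | ⟨m, hm, hcm, hmem, hall, hbv⟩
      · left
        refine ⟨hfix, ?_⟩
        intro u hu hcu
        rcases List.mem_cons.mp hu with h | h
        · subst h; exact hxb hcu
        · exact hall u h hcu
      · right
        refine ⟨m, hm, hcm, List.mem_cons_of_mem _ hmem, ?_, hbv⟩
        intro u hu hcu
        rcases List.mem_cons.mp hu with h | h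
        · subst h
          rcases hxb hcu with ⟨bv, hb, hle⟩
          exact le_trans hle (hbv bv hb)
        · exact hall u h hcu

-- the two fallbacks agree
lemma pv_fallback_eq (adn : String) :
    (let i := PySem.Chars.rfind adn.toList ['_']
     let base_name := if 0 ≤ i then PySem.Str.slice adn none (some i) else ""
     let separator := if 0 ≤ i then "_" else ""
     if separator ≠ "" ∧ base_name ≠ "" then base_name else adn) = pvAltFallback adn := by
  unfold pvAltFallback
  by_cases h1 : 0 < PySem.Chars.rfind adn.toList ['_']
  · have h0 : 0 ≤ PySem.Chars.rfind adn.toList ['_'] := le_of_lt h1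
    have hnil : adn.toList ≠ [] := by
      intro he
      rw [he] at h1
      exact absurd h1 (by decide)
    simp only [h0, h1, if_pos]
    rw [if_pos]
    refine ⟨by simp, ?_⟩
    intro hcontra
    have ht : (PySem.Str.slice adn none (some (PySem.Chars.rfind adn.toList ['_']))).toList
        = adn.toList.take (PySem.Chars.rfind adn.toList ['_']).toNat := by
      rw [PySem.Str.toList_slice, PySem.Chars.slice_eq_listSlice, PySem.List.slice_to _ h0]
    rw [hcontra] at ht
    have h3 : adn.toList.take (PySem.Chars.rfind adn.toList ['_']).toNat = [] := ht.symm
    rw [List.take_eq_nil_iff] at h3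
    rcases h3 with h | h
    · omega
    · exact hnil h
  · by_cases h0 : 0 ≤ PySem.Chars.rfind adn.toList ['_']
    · have hz : PySem.Chars.rfind adn.toList ['_'] = 0 := by omega
      rw [hz]
      have hsl : PySem.Str.slice adn none (some 0) = "" := by
        apply String.toList_inj.mp
        rw [PySem.Str.toList_slice, PySem.Chars.slice_eq_listSlice,
          PySem.List.slice_to _ (by omega : (0:Int) ≤ 0)]
        simp
      simp [hsl]
    · simp [h0, h1]

-- ===== VERDICT (by name: the statement is the Claim_ definition above) =====
theorem resolve_account_username_spec : Claim_equal_resolve_account_username := by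
  intro adn m cu _
  unfold Spec_resolve_account_username
  simp only [resolve_account_username, resolve_account_username_alt]
  by_cases hin : adn ∈ PySem.Dict.values (PySem.Dict.ofList m)
  · have hc : PySem.Set.contains
        (PySem.Set.ofList (PySem.Dict.values (PySem.Dict.ofList m))) adn = true :=
      (PySem.Set.contains_iff _ _).mpr ((PySem.Set.mem_ofList _ adn).mpr hin)
    rw [pvAltLoop_mem hin, hc]
    simp
  · have hc : PySem.Set.contains
        (PySem.Set.ofList (PySem.Dict.values (PySem.Dict.ofList m))) adn = false := by
      rw [Bool.eq_false_iff]
      intro h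
      exact hin ((PySem.Set.mem_ofList _ _).mp ((PySem.Set.contains_iff _ _).mp h))
    have hne : ∀ u ∈ PySem.Dict.values (PySem.Dict.ofList m), u ≠ adn :=
      fun u hu he => hin (he ▸ hu)
    rw [pvAltLoop_eq_foldl hne, hc]
    simp only [Bool.false_eq_true, if_false]
    rcases pvFold_spec adn cu (PySem.Dict.values (PySem.Dict.ofList m)) none with
      ⟨hfix, hall⟩ | ⟨mx, hm, hcm, hmem, hall, -⟩
    · rw [hfix]
      have hfe : (PySem.Set.ofList (PySem.Dict.values (PySem.Dict.ofList m))).filter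
          (fun u => pvCand adn cu u) = [] := by
        rw [List.filter_eq_nil_iff]
        intro u hu hcu
        rcases hall u ((PySem.Set.mem_ofList _ _).mp hu) hcu with ⟨bv, hb, -⟩
        cases hb
      simp only [pvCand] at hfe
      rw [hfe, (PySem.List.sorted_eq_nil_iff _ _ _).mpr rfl]
      exact pv_fallback_eq adn
    · rw [hm]
      have hmC : mx ∈ (PySem.Set.ofList (PySem.Dict.values (PySem.Dict.ofList m))).filter
          (fun u => pvCand adn cu u) :=
        List.mem_filter.mpr ⟨(PySem.Set.mem_ofList _ _).mpr hmem, hcm⟩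
      cases hs : PySem.List.sorted
          ((PySem.Set.ofList (PySem.Dict.values (PySem.Dict.ofList m))).filter
            (fun u => pvCand adn cu u)) (fun u => PySem.Str.len u) true with
      | nil =>
        rw [PySem.List.sorted_eq_nil_iff] at hs
        rw [hs] at hmC
        cases hmC
      | cons hh tt =>
        have hhC : hh ∈ (PySem.Set.ofList (PySem.Dict.values (PySem.Dict.ofList m))).filter
            (fun u => pvCand adn cu u) := by
          rw [← PySem.List.mem_sorted _ (fun u => PySem.Str.len u) true, hs]
          exact List.mem_cons_self
        have h1 : PySem.Str.len mx ≤ PySem.Str.len hh :=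
          PySem.List.key_head_sorted_rev_ge _ (fun u => PySem.Str.len u) hs mx hmC
        have h2 : PySem.Str.len hh ≤ PySem.Str.len mx :=
          hall hh ((PySem.Set.mem_ofList _ _).mp (List.mem_filter.mp hhC).1)
            (List.mem_filter.mp hhC).2
        have hpm : (mx.toList ++ ['_']) <+: adn.toList := by
          have h := hcm
          unfold pvCand at h
          rw [Bool.and_eq_true] at h
          exact (PySem.Chars.startswith_iff _ _).mp h.2
        have hph : (hh.toList ++ ['_']) <+: adn.toList := by
          have h := (List.mem_filter.mp hhC).2
          unfold pvCand at h
          rw [Bool.and_eq_true] at h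
          exact (PySem.Chars.startswith_iff _ _).mp h.2
        have heq : hh = mx := pv_uniq hph hpm (le_antisymm h2 h1)
        have hs2 := hs
        simp only [pvCand] at hs2
        rw [hs2, heq]
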